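-- pv_equiv track=rewrite | github.com/doanminhdang/ocr_tudien | cgi-bin/modules/Read_OCR.py | split_capital
-- ===== SOURCE A (Python) =====
-- def split_capital(phrase):
--     """Split capital and small words.
--     Capital words are only allowed at the first half of the phrase.
--     If a capital word is after a small word, it is NOT marked capital.
--     """
--     format_capital = []
--     words = phrase.split()
--     flag_prev_word_capital = True
--     for k in range(len(words)):
--         if words[k].isupper() and flag_prev_word_capital:
--             format_capital.append(True)
--         else:
--             format_capital.append(False)
--             flag_prev_word_capital = False
--     return words, format_capital
-- ===== SOURCE B (Python) =====
-- def split_capital(phrase):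
--     """Split capital and small words.
--     Capital words are only allowed at the first half of the phrase.
--     If a capital word is after a small word, it is NOT marked capital.
--     """
--     words = phrase.split()
--     n = 0
--     for w in words:
--         if not w.isupper():
--             break
--         n += 1
--     return words, [True] * n + [False] * (len(words) - n)
-- ===== Notes on version B (the rewrite author's own statement) =====
-- stated objective: simpler
-- what changed: Replaces the per-word latched boolean flag with a boundary computation (length of the maximal all-uppercase prefix, found by a loop that breaks at the first non-uppercase word) followed by direct block construction [True]*n + [False]*(len(words)-n).
import Mathlib
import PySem

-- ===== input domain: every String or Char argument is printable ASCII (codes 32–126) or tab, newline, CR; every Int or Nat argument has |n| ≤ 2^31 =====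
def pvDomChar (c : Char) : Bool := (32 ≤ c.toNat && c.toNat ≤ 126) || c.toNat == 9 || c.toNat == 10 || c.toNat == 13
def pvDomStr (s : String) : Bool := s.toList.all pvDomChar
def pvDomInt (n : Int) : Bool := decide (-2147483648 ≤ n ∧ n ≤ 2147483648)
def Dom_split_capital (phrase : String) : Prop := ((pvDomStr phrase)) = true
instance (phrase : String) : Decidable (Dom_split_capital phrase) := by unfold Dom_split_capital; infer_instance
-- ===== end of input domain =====

-- B replaces A's latched flag with a prefix-length-then-fill construction; objective: simpler.

-- str.isupper() on ASCII: at least one cased character and no lowercase one (shared primitive of both ports)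
def pyStrIsupper (s : String) : Bool :=
  s.toList.any PySem.Chars.isupper && !s.toList.any PySem.Chars.islower

-- ===== PORT A =====
def split_capital (phrase : String) : List String × List Bool :=
  let words := PySem.Str.split₀ phrase
  let res := (PySem.List.pyRange 0 (PySem.List.len words)).foldl
    (fun (st : List Bool × Bool) k =>
      if pyStrIsupper (PySem.List.pyGetD words k "") && st.2 then
        (st.1 ++ [true], st.2)
      else
        (st.1 ++ [false], false))
    ([], true)
  (words, res.1)

-- ===== PORT B =====
-- the break-at-first-non-uppercase loop of Source B
def countUpperPrefix : List String → Nat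
  | [] => 0
  | w :: ws => if pyStrIsupper w then countUpperPrefix ws + 1 else 0

def split_capital_alt (phrase : String) : List String × List Bool :=
  let words := PySem.Str.split₀ phrase
  let n := countUpperPrefix words
  (words, List.replicate n true ++ List.replicate (words.length - n) false)

-- ===== PRECONDITION & SPEC =====
def Spec_split_capital (phrase : String) (out : List String × List Bool) : Prop := out = split_capital_alt phrase
instance (phrase : String) (out : List String × List Bool) : Decidable (Spec_split_capital phrase out) := by unfold Spec_split_capital; infer_instance

-- ===== CLAIM (what is proved, stated in full; the proofs are below) =====
def Claim_equal_split_capital : Prop := ∀ (phrase : String), Dom_split_capital phrase → Spec_split_capital phrase (split_capital phrase)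

-- ===== LEMMAS AND PROOFS =====

def pvStep (st : List Bool × Bool) (w : String) : List Bool × Bool :=
  if pyStrIsupper w && st.2 then (st.1 ++ [true], st.2) else (st.1 ++ [false], false)

theorem pvFoldFalse (ws : List String) (acc : List Bool) :
    (ws.foldl pvStep (acc, false)).1 = acc ++ List.replicate ws.length false := by
  induction ws generalizing acc with
  | nil => simp
  | cons w ws ih =>
      have hs : pvStep (acc, false) w = (acc ++ [false], false) := by simp [pvStep]
      rw [List.foldl_cons, hs, ih]
      simp [List.replicate_succ]

theorem pvFoldTrue (ws : List String) (acc : List Bool) :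
    (ws.foldl pvStep (acc, true)).1 =
      acc ++ List.replicate (countUpperPrefix ws) true
          ++ List.replicate (ws.length - countUpperPrefix ws) false := by
  induction ws generalizing acc with
  | nil => simp [countUpperPrefix]
  | cons w ws ih =>
      by_cases h : pyStrIsupper w = true
      · have hs : pvStep (acc, true) w = (acc ++ [true], true) := by simp [pvStep, h]
        rw [List.foldl_cons, hs, ih]
        simp [countUpperPrefix, h, List.replicate_succ]
      · have hs : pvStep (acc, true) w = (acc ++ [false], false) := by simp [pvStep, h]
        rw [List.foldl_cons, hs, pvFoldFalse]
        simp [countUpperPrefix, h, List.replicate_succ]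

-- ===== VERDICT (by name: the statement is the Claim_ definition above) =====
theorem split_capital_spec : Claim_equal_split_capital := by
  unfold Claim_equal_split_capital
  intro phrase _
  unfold Spec_split_capital split_capital split_capital_alt
  have hr := PySem.List.foldl_pyRange_pyGetD (xs := PySem.Str.split₀ phrase) (d := "")
      (f := pvStep) (init := (([] : List Bool), true)) (a := 0) le_rfl
  simp only [pvStep] at hr
  simp only [hr, Int.toNat_zero, List.drop_zero]
  rw [pvFoldTrue]
  simp
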